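-- pv_equiv track=rewrite | github.com/IamGarret/battle | codebattle/python/nrzi_encoding.py | solution
-- ===== SOURCE A (Python) =====
-- def solution(s):
--   is_first = True
--   res = ''
--   for zeros in s.split('|'):
--     if not is_first:
--       res += '1' + '0' * (len(zeros) - 1)
--     else:
--       res += '0' * len(zeros)
--       is_first = False
--   return res
-- ===== SOURCE B (Python) =====
-- def solution(s):
--   out = []
--   skip = False
--   for ch in s:
--     if ch == '|':
--       out.append('1')
--       skip = True
--     elif skip:
--       skip = False
--     else:
--       out.append('0')
--   return ''.join(out)
-- ===== Notes on version B (the rewrite author's own statement) =====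
-- stated objective: alternative
-- what changed: Replaces the pipe-split plus a per-run first/rest fold (with run-length-minus-one zero arithmetic) by a single character scan carrying a skip flag: each pipe emits a one and suppresses the next run's leading zero.
import Mathlib
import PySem

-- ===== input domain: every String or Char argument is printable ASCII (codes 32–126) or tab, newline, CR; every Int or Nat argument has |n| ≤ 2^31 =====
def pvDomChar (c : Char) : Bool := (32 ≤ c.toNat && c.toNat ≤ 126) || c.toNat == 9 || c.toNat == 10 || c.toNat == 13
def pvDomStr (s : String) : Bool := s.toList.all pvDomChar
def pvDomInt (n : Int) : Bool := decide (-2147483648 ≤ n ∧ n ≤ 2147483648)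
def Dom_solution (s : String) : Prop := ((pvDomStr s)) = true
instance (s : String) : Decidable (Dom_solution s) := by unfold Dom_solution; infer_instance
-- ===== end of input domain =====

-- B replaces split('|') + a first/rest run fold by a single char scan with a skip flag; same cost, plainer.

-- ===== PORT A =====
-- A: res accumulated over s.split('|') with an is_first flag; '0' * (len(zeros) - 1)
-- is empty for len = 0, which Nat subtraction in List.replicate reproduces exactly.
def solution (s : String) : String :=
  String.ofList
    ((PySem.Chars.splitOn s.toList ['|']).foldl
      (fun (st : Bool × List Char) zeros =>
        if st.1 = false then (st.1, st.2 ++ '1' :: List.replicate (zeros.length - 1) '0')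
        else (false, st.2 ++ List.replicate zeros.length '0'))
      (true, [])).2

-- ===== PORT B =====
-- B: out is a list of single characters joined by ''; ported as a char-list accumulator.
def solution_alt (s : String) : String :=
  String.ofList
    (s.toList.foldl
      (fun (st : Bool × List Char) ch =>
        if ch = '|' then (true, st.2 ++ ['1'])
        else if st.1 then (false, st.2)
        else (st.1, st.2 ++ ['0']))
      (false, [])).2

-- ===== PRECONDITION & SPEC =====
def Spec_solution (s : String) (out : String) : Prop := out = solution_alt s
instance (s : String) (out : String) : Decidable (Spec_solution s out) := by unfold Spec_solution; infer_instance

-- ===== CLAIM (what is proved, stated in full; the proofs are below) =====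
def Claim_equal_solution : Prop := ∀ (s : String), Dom_solution s → Spec_solution s (solution s)

-- ===== LEMMAS AND PROOFS =====

-- simple structural recursion equal to splitOn cs ['|']
def mySplit : List Char → List (List Char)
  | [] => [[]]
  | c :: rest => if c = '|' then [] :: mySplit rest else (mySplit rest).modifyHead (c :: ·)

-- B's per-char emission as a recursion
def encB : List Char → Bool → List Char
  | [], _ => []
  | c :: rest, skip =>
      if c = '|' then '1' :: encB rest true
      else if skip then encB rest false
      else '0' :: encB rest false

theorem mySplit_ne_nil (cs : List Char) : mySplit cs ≠ [] := by
  induction cs with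
  | nil => simp [mySplit]
  | cons c rest ih =>
      simp only [mySplit]
      split_ifs
      · simp
      · cases h : mySplit rest with
        | nil => exact absurd h ih
        | cons p ps => simp [List.modifyHead]

theorem splitOn_go_spec (fuel : Nat) (l cur : List Char) (accs : List (List Char))
    (h : l.length ≤ fuel) :
    PySem.Chars.splitOn.go ['|'] fuel l cur accs =
      accs.reverse ++ (mySplit l).modifyHead (cur.reverse ++ ·) := by
  induction fuel generalizing l cur accs with
  | zero =>
      have : l = [] := by cases l <;> simp_all
      subst this
      simp [PySem.Chars.splitOn.go, mySplit, List.modifyHead]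
  | succ n ih =>
      cases l with
      | nil => simp [PySem.Chars.splitOn.go, mySplit, List.modifyHead]
      | cons c rest =>
          simp only [PySem.Chars.splitOn.go]
          by_cases hc : c = '|'
          · subst hc
            have hpre : List.isPrefixOf ['|'] ('|' :: rest) = true := by
              simp [List.isPrefixOf]
            simp only [hpre, if_pos]
            rw [ih _ _ _ (by simpa using Nat.le_of_succ_le_succ h)]
            simp only [mySplit, List.length_cons]
            cases h' : mySplit rest <;> simp [h']
          · have hpre : List.isPrefixOf ['|'] (c :: rest) = false := by
              simp only [List.isPrefixOf, Bool.and_true, beq_eq_false_iff_ne, ne_eq]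
              exact fun hh => hc hh.symm
            simp only [hpre, Bool.false_eq_true, if_false]
            rw [ih _ _ _ (by simpa using Nat.le_of_succ_le_succ h)]
            simp only [mySplit, if_neg hc]
            obtain ⟨p, ps, hps⟩ : ∃ p ps, mySplit rest = p :: ps := by
              cases h : mySplit rest with
              | nil => exact absurd h (mySplit_ne_nil rest)
              | cons p ps => exact ⟨p, ps, rfl⟩
            simp [hps, List.modifyHead]

theorem splitOn_eq_mySplit (cs : List Char) :
    PySem.Chars.splitOn cs ['|'] = mySplit cs := by
  have h := splitOn_go_spec (cs.length + 1) cs [] [] (by omega)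
  rw [PySem.Chars.splitOn, h]
  cases mySplit cs <;> simp [List.modifyHead]

-- A's fold, rest phase (is_first already false)
theorem foldA_rest (ps : List (List Char)) (acc : List Char) :
    (ps.foldl
      (fun (st : Bool × List Char) zeros =>
        if st.1 = false then (st.1, st.2 ++ '1' :: List.replicate (zeros.length - 1) '0')
        else (false, st.2 ++ List.replicate zeros.length '0'))
      (false, acc)) =
    (false, acc ++ ps.flatMap (fun p => '1' :: List.replicate (p.length - 1) '0')) := by
  induction ps generalizing acc with
  | nil => simp
  | cons p ps ih => simp [List.foldl, ih]

-- B's fold equals the recursion encB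
theorem foldB_spec (cs : List Char) (skip : Bool) (acc : List Char) :
    (cs.foldl
      (fun (st : Bool × List Char) ch =>
        if ch = '|' then (true, st.2 ++ ['1'])
        else if st.1 then (false, st.2)
        else (st.1, st.2 ++ ['0']))
      (skip, acc)).2 = acc ++ encB cs skip := by
  induction cs generalizing skip acc with
  | nil => simp [encB]
  | cons c rest ih =>
      by_cases hc : c = '|'
      · simp [List.foldl, hc, encB, ih]
      · cases skip <;> simp [List.foldl, hc, encB, ih]

-- the heart: A's run encoding of mySplit equals B's char scan, mutually for both phases
theorem enc_agree (cs : List Char) :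
    (∀ p ps, mySplit cs = p :: ps →
      List.replicate p.length '0' ++
        ps.flatMap (fun q => '1' :: List.replicate (q.length - 1) '0') = encB cs false) ∧
    ((mySplit cs).flatMap (fun q => '1' :: List.replicate (q.length - 1) '0') =
      '1' :: encB cs true) := by
  induction cs with
  | nil =>
      constructor
      · intro p ps hp
        simp only [mySplit] at hp
        cases hp
        simp [encB]
      · simp [mySplit, encB]
  | cons c rest ih =>
      obtain ⟨ih1, ih2⟩ := ih
      by_cases hc : c = '|'
      · constructor
        · intro p ps hp
          simp only [mySplit, hc, if_pos] at hp
          cases hp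
          simpa [encB, hc] using ih2
        · simp only [mySplit, hc, if_pos]
          simp [encB, ih2]
      · obtain ⟨p0, ps0, hps⟩ : ∃ p ps, mySplit rest = p :: ps := by
          cases h : mySplit rest with
          | nil => exact absurd h (mySplit_ne_nil rest)
          | cons p ps => exact ⟨p, ps, rfl⟩
        have h1 := ih1 p0 ps0 hps
        constructor
        · intro p ps hp
          simp only [mySplit, if_neg hc, hps, List.modifyHead] at hp
          cases hp
          simp only [List.length_cons, List.replicate_succ, List.cons_append]
          simp [encB, hc, h1]
        · simp only [mySplit, if_neg hc, hps, List.modifyHead]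
          simp only [List.flatMap_cons, List.length_cons, Nat.add_sub_cancel]
          simp [encB, hc, h1]

-- ===== VERDICT (by name: the statement is the Claim_ definition above) =====
theorem solution_spec : Claim_equal_solution := by
  intro s _
  unfold Spec_solution solution solution_alt
  rw [splitOn_eq_mySplit, foldB_spec]
  obtain ⟨p, ps, hps⟩ : ∃ p ps, mySplit s.toList = p :: ps := by
    cases h : mySplit s.toList with
    | nil => exact absurd h (mySplit_ne_nil s.toList)
    | cons p ps => exact ⟨p, ps, rfl⟩
  have h1 := (enc_agree s.toList).1 p ps hps
  rw [hps]
  simp only [List.foldl_cons, if_neg (by simp : ¬ (true = false)), foldA_rest]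
  simp [h1]
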